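-- pv_equiv track=rewrite | github.com/Lukh2010/devcontrol-dashboard | backend/command_classifier.py | contains_dangerous_shell_metachars
-- ===== SOURCE A (Python) =====
-- def contains_dangerous_shell_metachars(command: str) -> bool:
--     """Return whether the command contains blocked shell operators."""
--     if not isinstance(command, str):
--         return False
--
--     stripped_command = command.strip()
--     if not stripped_command:
--         return False
--
--     in_single_quote = False
--     in_double_quote = False
--     escaped = False
--     index = 0
--
--     while index < len(stripped_command):
--         char = stripped_command[index]
--         next_char = stripped_command[index + 1] if index + 1 < len(stripped_command) else ""
--
--         if escaped:
--             escaped = False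
--             index += 1
--             continue
--
--         if char == "\\" and not in_single_quote:
--             escaped = True
--             index += 1
--             continue
--
--         if char == "'" and not in_double_quote:
--             in_single_quote = not in_single_quote
--             index += 1
--             continue
--
--         if char == '"' and not in_single_quote:
--             in_double_quote = not in_double_quote
--             index += 1
--             continue
--
--         if in_single_quote or in_double_quote:
--             index += 1
--             continue
--
--         if char == "`":
--             return True
--
--         if char == "$" and next_char in ("(", "{"):
--             return True
--
--         if char == "&" and next_char == "&":
--             return True
--
--         if char == "&":
--             return True
--
--         if char == "|" and next_char == "|":
--             return True
--
--         if char == ">" and next_char == ">":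
--             return True
--
--         if char in {"|", ">", "<", ";"}:
--             return True
--
--         index += 1
--
--     return False
-- ===== SOURCE B (Python) =====
-- def contains_dangerous_shell_metachars(command: str) -> bool:
--     """Return whether the command contains blocked shell operators."""
--     if not isinstance(command, str):
--         return False
--     s = command.strip()
--     if not s:
--         return False
--     # pass 1: collect the characters that reach the metachar checks,
--     # each with the raw next character from the stripped string
--     active = []
--     sq = dq = esc = False
--     for i, ch in enumerate(s):
--         if esc:
--             esc = False
--         elif ch == "\\" and not sq:
--             esc = True
--         elif ch == "'" and not dq:
--             sq = not sq
--         elif ch == '"' and not sq: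
--             dq = not dq
--         elif sq or dq:
--             pass
--         else:
--             active.append((ch, s[i + 1] if i + 1 < len(s) else ""))
--     # pass 2: classify
--     return any(c == "`" or (c == "$" and n in ("(", "{")) or c in "&|><;"
--                for c, n in active)
-- ===== Notes on version B (the rewrite author's own statement) =====
-- stated objective: alternative
-- what changed: Splits A's single early-returning while loop into two passes: one scan collecting the unquoted/unescaped characters together with their raw successor, then an any() over that list classifying the dangerous operators (A's redundant &&/||/>> branches collapse into the single-character tests).
import Mathlib
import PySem

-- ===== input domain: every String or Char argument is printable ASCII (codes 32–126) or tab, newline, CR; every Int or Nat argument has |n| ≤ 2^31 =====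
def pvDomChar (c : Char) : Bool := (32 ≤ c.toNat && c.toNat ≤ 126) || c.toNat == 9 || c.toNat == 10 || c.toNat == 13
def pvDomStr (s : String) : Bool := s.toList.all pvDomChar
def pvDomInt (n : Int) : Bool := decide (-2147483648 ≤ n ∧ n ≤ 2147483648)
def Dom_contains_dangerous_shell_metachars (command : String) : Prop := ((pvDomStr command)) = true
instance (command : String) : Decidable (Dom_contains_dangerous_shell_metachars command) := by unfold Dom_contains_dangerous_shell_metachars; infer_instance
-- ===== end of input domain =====

-- B replaces A's single early-returning while loop by two passes (collect active chars with their raw successor, then any() classifying the operators); objective: alternative decomposition, same cost.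

-- ===== PORT A =====
-- A's while loop over the stripped string: state (sq, dq, esc), next_char = head of the rest (none = Python's "").
def pvLoopA : List Char → Bool → Bool → Bool → Bool
  | [], _, _, _ => false
  | c :: rest, sq, dq, esc =>
    let next : Option Char := rest.head?
    if esc then pvLoopA rest sq dq false
    else if c == '\\' && !sq then pvLoopA rest sq dq true
    else if c == '\'' && !dq then pvLoopA rest (!sq) dq esc
    else if c == '"' && !sq then pvLoopA rest sq (!dq) esc
    else if sq || dq then pvLoopA rest sq dq esc
    else if c == '`' then true
    else if c == '$' && (next == some '(' || next == some '{') then true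
    else if c == '&' && next == some '&' then true
    else if c == '&' then true
    else if c == '|' && next == some '|' then true
    else if c == '>' && next == some '>' then true
    else if c == '|' || c == '>' || c == '<' || c == ';' then true
    else pvLoopA rest sq dq esc

def contains_dangerous_shell_metachars (command : String) : Bool :=
  let stripped := PySem.Str.strip command
  if stripped.toList.isEmpty then false
  else pvLoopA stripped.toList false false false

-- ===== PORT B =====
-- pass 1: collect the characters that reach the metachar checks, paired with the raw next char
def pvCollectB : List Char → Bool → Bool → Bool → List (Char × Option Char)
  | [], _, _, _ => []
  | c :: rest, sq, dq, esc =>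
    if esc then pvCollectB rest sq dq false
    else if c == '\\' && !sq then pvCollectB rest sq dq true
    else if c == '\'' && !dq then pvCollectB rest (!sq) dq esc
    else if c == '"' && !sq then pvCollectB rest sq (!dq) esc
    else if sq || dq then pvCollectB rest sq dq esc
    else (c, rest.head?) :: pvCollectB rest sq dq esc

-- pass 2 predicate: c == "`" or (c == "$" and n in ("(", "{")) or c in "&|><;"
def pvDangerB (p : Char × Option Char) : Bool :=
  p.1 == '`' || (p.1 == '$' && (p.2 == some '(' || p.2 == some '{')) ||
  (p.1 == '&' || p.1 == '|' || p.1 == '>' || p.1 == '<' || p.1 == ';')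

def contains_dangerous_shell_metachars_alt (command : String) : Bool :=
  let s := PySem.Str.strip command
  if s.toList.isEmpty then false
  else (pvCollectB s.toList false false false).any pvDangerB

-- ===== PRECONDITION & SPEC =====
def Spec_contains_dangerous_shell_metachars (command : String) (out : Bool) : Prop := out = contains_dangerous_shell_metachars_alt command
instance (command : String) (out : Bool) : Decidable (Spec_contains_dangerous_shell_metachars command out) := by unfold Spec_contains_dangerous_shell_metachars; infer_instance

-- ===== CLAIM (what is proved, stated in full; the proofs are below) =====
def Claim_equal_contains_dangerous_shell_metachars : Prop := ∀ (command : String), Dom_contains_dangerous_shell_metachars command → Spec_contains_dangerous_shell_metachars command (contains_dangerous_shell_metachars command)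

-- ===== LEMMAS AND PROOFS =====
-- A's cascade of early returns equals "dangerous here, or continue"
lemma pvCascade_eq (c : Char) (next : Option Char) (k : Bool) :
    (if c == '`' then true
     else if c == '$' && (next == some '(' || next == some '{') then true
     else if c == '&' && next == some '&' then true
     else if c == '&' then true
     else if c == '|' && next == some '|' then true
     else if c == '>' && next == some '>' then true
     else if c == '|' || c == '>' || c == '<' || c == ';' then true
     else k) = (pvDangerB (c, next) || k) := by
  rw [Bool.eq_iff_iff]
  simp only [pvDangerB]
  split_ifs with h1 h2 h3 h4 h5 h6 h7 <;> simp_all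

lemma pvLoopA_eq_any (l : List Char) : ∀ (sq dq esc : Bool),
    pvLoopA l sq dq esc = (pvCollectB l sq dq esc).any pvDangerB := by
  induction l with
  | nil => intro sq dq esc; simp [pvLoopA, pvCollectB]
  | cons c rest ih =>
    intro sq dq esc
    simp only [pvLoopA, pvCollectB]
    rw [pvCascade_eq]
    split_ifs with h1 h2 h3 h4 h5
    · exact ih ..
    · exact ih ..
    · exact ih ..
    · exact ih ..
    · exact ih ..
    · simp only [List.any_cons, ih]

-- ===== VERDICT (by name: the statement is the Claim_ definition above) =====
theorem contains_dangerous_shell_metachars_spec : Claim_equal_contains_dangerous_shell_metachars := by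
  intro command _
  unfold Spec_contains_dangerous_shell_metachars
  unfold contains_dangerous_shell_metachars contains_dangerous_shell_metachars_alt
  simp only [pvLoopA_eq_any]
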